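-- pv_equiv track=rewrite | github.com/flyspark015/NexaPCB | nexapcb/part_tools.py | _iter_block_spans
-- ===== SOURCE A (Python) =====
-- def _iter_block_spans(text: str, marker: str) -> list[tuple[int, int]]:
--     spans: list[tuple[int, int]] = []
--     idx = 0
--     while True:
--         start = text.find(marker, idx)
--         if start == -1:
--             break
--         depth = 0
--         end = None
--         for pos in range(start, len(text)):
--             if text[pos] == "(":
--                 depth += 1
--             elif text[pos] == ")":
--                 depth -= 1
--                 if depth == 0:
--                     end = pos + 1
--                     break
--         if end is None:
--             break
--         spans.append((start, end))
--         idx = end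
--     return spans
-- ===== SOURCE B (Python) =====
-- def _iter_block_spans(text: str, marker: str) -> list[tuple[int, int]]:
--     # Single left-to-right automaton: one pass over text with an in_block flag,
--     # instead of A's repeated find() restarts with a nested scanning loop.
--     spans: list[tuple[int, int]] = []
--     in_block = False
--     depth = 0
--     block_start = 0
--     for pos in range(len(text)):
--         if not in_block and text.startswith(marker, pos):
--             in_block = True
--             block_start = pos
--             depth = 0
--         if in_block:
--             c = text[pos]
--             if c == "(":
--                 depth += 1
--             elif c == ")":
--                 depth -= 1
--                 if depth == 0:
--                     spans.append((block_start, pos + 1))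
--                     in_block = False
--     return spans
-- ===== Notes on version B (the rewrite author's own statement) =====
-- stated objective: simpler
-- what changed: Replaced the find()-restart outer loop with a nested paren-scanning loop by a single left-to-right pass holding an in_block flag, depth and block_start.
import Mathlib
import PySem

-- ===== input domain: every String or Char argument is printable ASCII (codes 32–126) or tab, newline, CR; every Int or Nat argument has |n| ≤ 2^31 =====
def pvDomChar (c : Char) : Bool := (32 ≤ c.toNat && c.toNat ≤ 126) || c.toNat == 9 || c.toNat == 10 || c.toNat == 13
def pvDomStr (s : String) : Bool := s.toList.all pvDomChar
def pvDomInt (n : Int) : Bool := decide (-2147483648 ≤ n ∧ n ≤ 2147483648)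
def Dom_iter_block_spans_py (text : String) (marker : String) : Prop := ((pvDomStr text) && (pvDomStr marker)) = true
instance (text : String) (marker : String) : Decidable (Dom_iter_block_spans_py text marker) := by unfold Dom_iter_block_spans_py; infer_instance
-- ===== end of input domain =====

-- B replaces A's find()-restart loop with nested paren scan by one left-to-right
-- automaton (in_block flag, depth, block_start); same return value, proved equal.

-- ===== PORT A =====
-- hand port of Python str.find(marker, idx): smallest s ≥ idx with marker a prefix of
-- text[s:]; exact for 0 ≤ idx ≤ len(text), which is the only way A calls it
def pvFind (cs m : List Char) (i : Nat) : Option Nat :=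
  if h : i < cs.length then
    if m.isPrefixOf (cs.drop i) then some i else pvFind cs m (i + 1)
  else if m.isPrefixOf (cs.drop i) then some i else none
termination_by cs.length - i
decreasing_by omega

-- A's inner `for pos in range(start, len(text))` with depth counter and break;
-- l is text[pos:], pos the absolute index
def pvScanEnd : List Char → Nat → Int → Option Nat
  | [], _, _ => none
  | c :: rest, pos, depth =>
    if c = '(' then pvScanEnd rest (pos + 1) (depth + 1)
    else if c = ')' then
      if depth - 1 = 0 then some (pos + 1) else pvScanEnd rest (pos + 1) (depth - 1)
    else pvScanEnd rest (pos + 1) depth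

-- A's `while True` loop; fuel = len+1 only makes it total (idx strictly increases,
-- so fuel never runs out on the initial call)
def pvALoop (cs m : List Char) (idx : Nat) (spans : List (Int × Int)) : Nat → List (Int × Int)
  | 0 => spans
  | fuel + 1 =>
    match pvFind cs m idx with
    | none => spans
    | some s =>
      match pvScanEnd (cs.drop s) s 0 with
      | none => spans
      | some e => pvALoop cs m e (spans ++ [((s : Int), (e : Int))]) fuel

def iter_block_spans_py (text : String) (marker : String) : List (Int × Int) :=
  pvALoop text.toList marker.toList 0 [] (text.toList.length + 1)

-- ===== PORT B =====
-- B's single for-loop over pos; l is text[pos:], state (inb, depth, bstart, spans)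
def pvBLoop (m : List Char) : List Char → Nat → Bool → Int → Nat → List (Int × Int) → List (Int × Int)
  | [], _, _, _, _, spans => spans
  | c :: rest, pos, inb, depth, bstart, spans =>
    let enter := !inb && m.isPrefixOf (c :: rest)
    let inb' := inb || enter
    let depth' := if enter then (0 : Int) else depth
    let bstart' := if enter then pos else bstart
    if inb' then
      if c = '(' then pvBLoop m rest (pos + 1) true (depth' + 1) bstart' spans
      else if c = ')' then
        if depth' - 1 = 0 then
          pvBLoop m rest (pos + 1) false 0 bstart' (spans ++ [((bstart' : Int), ((pos : Int) + 1))])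
        else pvBLoop m rest (pos + 1) true (depth' - 1) bstart' spans
      else pvBLoop m rest (pos + 1) true depth' bstart' spans
    else pvBLoop m rest (pos + 1) false depth bstart spans

def iter_block_spans_py_alt (text : String) (marker : String) : List (Int × Int) :=
  pvBLoop marker.toList text.toList 0 false 0 0 []

-- ===== PRECONDITION & SPEC =====
def Spec_iter_block_spans_py (text : String) (marker : String) (out : List (Int × Int)) : Prop := out = iter_block_spans_py_alt text marker
instance (text : String) (marker : String) (out : List (Int × Int)) : Decidable (Spec_iter_block_spans_py text marker out) := by unfold Spec_iter_block_spans_py; infer_instance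

-- ===== CLAIM (what is proved, stated in full; the proofs are below) =====
def Claim_equal_iter_block_spans_py : Prop := ∀ (text : String) (marker : String), Dom_iter_block_spans_py text marker → Spec_iter_block_spans_py text marker (iter_block_spans_py text marker)

-- ===== LEMMAS AND PROOFS =====

theorem pvScanEnd_gt {l : List Char} {pos : Nat} {d : Int} {e : Nat}
    (h : pvScanEnd l pos d = some e) : pos < e := by
  induction l generalizing pos d with
  | nil => simp [pvScanEnd] at h
  | cons c rest ih =>
    simp only [pvScanEnd] at h
    split_ifs at h with h1 h2 h3
    · exact Nat.lt_of_succ_lt (ih h)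
    · simp at h; omega
    · exact Nat.lt_of_succ_lt (ih h)
    · exact Nat.lt_of_succ_lt (ih h)

theorem pvScanEnd_le {l : List Char} {pos : Nat} {d : Int} {e : Nat}
    (h : pvScanEnd l pos d = some e) : e ≤ pos + l.length := by
  induction l generalizing pos d with
  | nil => simp [pvScanEnd] at h
  | cons c rest ih =>
    simp only [pvScanEnd, List.length_cons] at h ⊢
    split_ifs at h with h1 h2 h3
    · have := ih h; omega
    · simp at h; omega
    · have := ih h; omega
    · have := ih h; omega

theorem pvFind_bounds {cs m : List Char} {i s : Nat} (hi : i ≤ cs.length)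
    (h : pvFind cs m i = some s) : i ≤ s ∧ s ≤ cs.length := by
  unfold pvFind at h
  split_ifs at h with h1 h2 h3
  · simp at h; omega
  · have := pvFind_bounds (by omega) h; omega
  · simp at h; omega
termination_by cs.length - i
decreasing_by omega

-- one step of B while in a block
theorem pvBLoop_step_true (m : List Char) (c : Char) (rest : List Char) (pos : Nat)
    (d : Int) (b : Nat) (spans : List (Int × Int)) :
    pvBLoop m (c :: rest) pos true d b spans =
      if c = '(' then pvBLoop m rest (pos + 1) true (d + 1) b spans
      else if c = ')' then
        if d - 1 = 0 then pvBLoop m rest (pos + 1) false 0 b (spans ++ [((b : Int), ((pos : Int) + 1))])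
        else pvBLoop m rest (pos + 1) true (d - 1) b spans
      else pvBLoop m rest (pos + 1) true d b spans := by
  simp [pvBLoop]

-- one step of B outside a block when the marker does not match here
theorem pvBLoop_step_skip (m : List Char) (c : Char) (rest : List Char) (pos : Nat)
    (d : Int) (b : Nat) (spans : List (Int × Int)) (hp : ¬ m.isPrefixOf (c :: rest)) :
    pvBLoop m (c :: rest) pos false d b spans = pvBLoop m rest (pos + 1) false d b spans := by
  simp [pvBLoop, hp]

-- entering a block at pos: B's step with a marker match equals the in-block step
-- with depth 0 and block_start = pos
theorem pvBLoop_enter (m : List Char) (c : Char) (rest : List Char) (pos : Nat)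
    (d : Int) (b : Nat) (spans : List (Int × Int)) (hp : m.isPrefixOf (c :: rest)) :
    pvBLoop m (c :: rest) pos false d b spans = pvBLoop m (c :: rest) pos true 0 pos spans := by
  simp [pvBLoop, hp]

-- in-block mode is exactly A's inner scan
theorem pvBLoop_inblock (m : List Char) (l : List Char) (pos : Nat) (d : Int)
    (b : Nat) (spans : List (Int × Int)) :
    pvBLoop m l pos true d b spans =
      match pvScanEnd l pos d with
      | none => spans
      | some e => pvBLoop m (l.drop (e - pos)) e false 0 b (spans ++ [((b : Int), (e : Int))]) := by
  induction l generalizing pos d with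
  | nil => simp [pvBLoop, pvScanEnd]
  | cons c rest ih =>
    rw [pvBLoop_step_true]
    by_cases h1 : c = '('
    · simp only [pvScanEnd, if_pos h1]
      rw [ih]
      cases he : pvScanEnd rest (pos + 1) (d + 1) with
      | none => rfl
      | some e =>
        have := pvScanEnd_gt he
        dsimp only
        congr 1
        have : e - pos = (e - (pos + 1)) + 1 := by omega
        rw [this, List.drop_succ_cons]
    · by_cases h2 : c = ')'
      · simp only [pvScanEnd, if_neg h1, if_pos h2]
        by_cases h3 : d - 1 = 0
        · simp only [if_pos h3]
          congr 1
          have : pos + 1 - pos = 1 := by omega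
          rw [this, List.drop_succ_cons, List.drop_zero]
        · simp only [if_neg h3]
          rw [ih]
          cases he : pvScanEnd rest (pos + 1) (d - 1) with
          | none => rfl
          | some e =>
            have := pvScanEnd_gt he
            dsimp only
            congr 1
            have : e - pos = (e - (pos + 1)) + 1 := by omega
            rw [this, List.drop_succ_cons]
      · simp only [pvScanEnd, if_neg h1, if_neg h2]
        rw [ih]
        cases he : pvScanEnd rest (pos + 1) d with
        | none => rfl
        | some e =>
          have := pvScanEnd_gt he
          dsimp only
          congr 1
          have : e - pos = (e - (pos + 1)) + 1 := by omega
          rw [this, List.drop_succ_cons]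

-- not-in-block mode skips to the first marker match, i.e. to pvFind
theorem pvBLoop_seek (cs m : List Char) (i : Nat) (d : Int) (b : Nat)
    (spans : List (Int × Int)) (hi : i ≤ cs.length) :
    pvBLoop m (cs.drop i) i false d b spans =
      match pvFind cs m i with
      | none => spans
      | some s => pvBLoop m (cs.drop s) s true 0 s spans := by
  rcases Nat.lt_or_ge i cs.length with hlt | hge
  · obtain ⟨c, rest, hcr⟩ : ∃ c rest, cs.drop i = c :: rest := by
      cases h : cs.drop i with
      | nil => have := List.drop_eq_nil_iff.mp h; omega
      | cons c rest => exact ⟨c, rest, rfl⟩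
    by_cases hp : m.isPrefixOf (cs.drop i)
    · rw [pvFind]
      simp only [dif_pos hlt, if_pos hp]
      rw [hcr, pvBLoop_enter m c rest i d b spans (hcr ▸ hp), ← hcr]
    · rw [pvFind]
      simp only [dif_pos hlt, if_neg hp]
      have hrest : rest = cs.drop (i + 1) := by
        have h1 : cs.drop (i + 1) = (cs.drop i).tail := by
          rw [← List.drop_drop]; simp
        rw [h1, hcr]; rfl
      rw [hcr, pvBLoop_step_skip m c rest i d b spans (by rw [← hcr]; exact hp), hrest]
      exact pvBLoop_seek cs m (i + 1) d b spans (by omega)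
  · have hnil : cs.drop i = [] := List.drop_eq_nil_iff.mpr (by omega)
    rw [pvFind]
    simp only [dif_neg (by omega : ¬ i < cs.length)]
    rw [hnil]
    by_cases hp : m.isPrefixOf ([] : List Char)
    · simp only [if_pos hp, hnil, pvBLoop]
    · simp only [if_neg hp, pvBLoop]
termination_by cs.length - i
decreasing_by omega

theorem pvMain (cs m : List Char) : ∀ (fuel i : Nat) (d : Int) (b : Nat)
    (spans : List (Int × Int)), i ≤ cs.length → cs.length < i + fuel →
    pvALoop cs m i spans fuel = pvBLoop m (cs.drop i) i false d b spans := by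
  intro fuel
  induction fuel with
  | zero => intro i d b spans h1 h2; omega
  | succ fuel ih =>
    intro i d b spans h1 h2
    rw [pvBLoop_seek cs m i d b spans h1]
    rw [pvALoop]
    cases hf : pvFind cs m i with
    | none => rfl
    | some s =>
      have hs := pvFind_bounds h1 hf
      dsimp only
      rw [pvBLoop_inblock]
      cases he : pvScanEnd (cs.drop s) s 0 with
      | none => rfl
      | some e =>
        have hgt := pvScanEnd_gt he
        have hle := pvScanEnd_le he
        simp only [List.length_drop] at hle
        have hdd : (cs.drop s).drop (e - s) = cs.drop e := by
          rw [List.drop_drop]; congr 1; omega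
        dsimp only
        rw [hdd]
        exact ih e 0 s (spans ++ [((s : Int), (e : Int))]) (by omega) (by omega)

-- ===== VERDICT (by name: the statement is the Claim_ definition above) =====
theorem iter_block_spans_py_spec : Claim_equal_iter_block_spans_py := by
  intro text marker _
  unfold Spec_iter_block_spans_py iter_block_spans_py iter_block_spans_py_alt
  have h := pvMain text.toList marker.toList (text.toList.length + 1) 0 0 0 []
    (Nat.zero_le _) (by omega)
  simpa using h
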